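-- pv_equiv track=rewrite | github.com/luis15pt/Nexgen-MAAS-validation | reporting/device_certificate.py | enrich_nics_from_lshw
-- ===== SOURCE A (Python) =====
-- def enrich_nics_from_lshw(nics: list[dict], lshw_nics: list[dict]) -> list[dict]:
--     """Enrich MAAS NIC list with product names from lshw, matched by MAC."""
--     if not lshw_nics:
--         return nics
--
--     # Build MAC -> lshw NIC lookup
--     by_mac = {}
--     for ln in lshw_nics:
--         mac = ln.get("mac", "").lower().strip()
--         if mac:
--             by_mac[mac] = ln
--
--     for nic in nics:
--         mac = (nic.get("mac", "") or "").lower().strip()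
--         lshw_nic = by_mac.get(mac)
--         if lshw_nic:
--             # Only override if MAAS didn't have product info
--             if not nic.get("product"):
--                 nic["product"] = lshw_nic.get("product", "")
--             if not nic.get("vendor") or nic["vendor"] == "--":
--                 nic["vendor"] = lshw_nic.get("vendor", "")
--
--     return nics
-- ===== SOURCE B (Python) =====
-- def enrich_nics_from_lshw(nics: list[dict], lshw_nics: list[dict]) -> list[dict]:
--     """Enrich MAAS NIC list with product names from lshw, matched by MAC.
--
--     Inverted traversal, no dict: normalize all NIC MACs once, then loop over
--     lshw entries OUTER, stamping each entry onto a parallel candidate array for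
--     every NIC it matches (later entries overwrite earlier ones, reproducing the
--     dict's last-write-wins); a final zip pass applies the two overrides.
--     Mutates and returns the same nics list, like the original.
--     """
--     norms = [(nic.get("mac", "") or "").lower().strip() for nic in nics]
--     cand = [None] * len(nics)
--     for ln in lshw_nics:
--         m = ln.get("mac", "").lower().strip()
--         if not m:
--             continue
--         for i, nm in enumerate(norms):
--             if nm == m:
--                 cand[i] = ln
--     for nic, ln in zip(nics, cand):
--         if ln is None:
--             continue
--         if not nic.get("product"):
--             nic["product"] = ln.get("product", "")
--         if not nic.get("vendor") or nic["vendor"] == "--":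
--             nic["vendor"] = ln.get("vendor", "")
--     return nics
-- ===== Notes on version B (the rewrite author's own statement) =====
-- stated objective: alternative
-- what changed: Inverts the traversal: instead of prebuilding a MAC->lshw dict and looking each NIC up, B normalizes NIC MACs once, then loops over lshw entries OUTER, stamping each onto a parallel candidate array for every matching NIC (later entries overwrite = the dict's last-write-wins), and a final zip pass applies the two overrides; trades the hash lookup for an O(n*m) double scan with no dictionary at all.
import Mathlib
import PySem

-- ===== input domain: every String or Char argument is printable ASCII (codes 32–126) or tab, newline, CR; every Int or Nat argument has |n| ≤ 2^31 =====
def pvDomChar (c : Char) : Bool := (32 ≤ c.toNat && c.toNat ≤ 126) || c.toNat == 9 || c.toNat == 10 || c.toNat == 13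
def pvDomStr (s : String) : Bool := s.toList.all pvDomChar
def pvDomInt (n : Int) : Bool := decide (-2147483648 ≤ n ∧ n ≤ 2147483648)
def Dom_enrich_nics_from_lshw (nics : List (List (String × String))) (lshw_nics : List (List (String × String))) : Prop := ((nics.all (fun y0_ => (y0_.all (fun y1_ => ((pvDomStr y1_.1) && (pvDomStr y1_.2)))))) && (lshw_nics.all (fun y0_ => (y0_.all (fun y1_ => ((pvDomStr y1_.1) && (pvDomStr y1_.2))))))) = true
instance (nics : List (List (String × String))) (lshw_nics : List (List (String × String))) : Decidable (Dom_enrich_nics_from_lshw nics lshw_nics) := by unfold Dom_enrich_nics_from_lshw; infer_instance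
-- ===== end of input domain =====

-- B inverts A's traversal: instead of a prebuilt mac->lshw dict consulted per NIC, it loops
-- over lshw entries and stamps each onto a parallel candidate array (later entries overwrite
-- = the dict's last-write-wins), then a final zip pass applies the same two overrides.
-- Both Pythons mutate the nic dicts in place and return the same list, identically.
-- ===== PORT A =====
-- A builds a mac -> lshw-dict table (loop = structural recursion), then updates each nic.
-- (Python mutates the nic dicts in place; under the type convention each dict is
-- its item list, so the port maps each nic through PySem.Dict.ofList and back.)
def pvA_buildByMac (acc : PySem.Dict String (PySem.Dict String String)) :
    List (List (String × String)) → PySem.Dict String (PySem.Dict String String)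
  | [] => acc
  | ln0 :: rest =>
    let ln := PySem.Dict.ofList ln0
    let mac := PySem.Str.strip (PySem.Str.lower (ln.getD "mac" ""))
    pvA_buildByMac (if mac ≠ "" then acc.insert mac ln else acc) rest

def pvA_update (by_mac : PySem.Dict String (PySem.Dict String String)) (nic0 : List (String × String)) : List (String × String) :=
  let nic := PySem.Dict.ofList nic0
  let m0 := nic.getD "mac" ""                               -- nic.get("mac", "") or ""
  let mac := PySem.Str.strip (PySem.Str.lower (if m0 = "" then "" else m0))
  match by_mac.get? mac with
  | none => nic.items
  | some lshw_nic =>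
    if lshw_nic.items = [] then nic.items                   -- `if lshw_nic:` dict truthiness
    else
      let nic := if nic.getD "product" "" = "" then nic.insert "product" (lshw_nic.getD "product" "") else nic
      let nic := if nic.getD "vendor" "" = "" ∨ nic.getD "vendor" "" = "--" then nic.insert "vendor" (lshw_nic.getD "vendor" "") else nic
      nic.items

def enrich_nics_from_lshw (nics : List (List (String × String))) (lshw_nics : List (List (String × String))) : List (List (String × String)) :=
  if lshw_nics = [] then nics.map (fun nic0 => (PySem.Dict.ofList nic0).items)
  else
    let by_mac := pvA_buildByMac PySem.Dict.empty lshw_nics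
    nics.map (fun nic0 => pvA_update by_mac nic0)

-- ===== PORT B =====
-- the inner `for i, nm in enumerate(norms): if nm == m: cand[i] = ln` pass,
-- a pointwise update of the candidate array (indexed assignment = zipWith)
def pvB_stamp (ln0 : List (String × String)) (norms : List String)
    (cand : List (Option (PySem.Dict String String))) : List (Option (PySem.Dict String String)) :=
  let ln := PySem.Dict.ofList ln0
  let m := PySem.Str.strip (PySem.Str.lower (ln.getD "mac" ""))
  if m = "" then cand
  else List.zipWith (fun nm c => if nm = m then some ln else c) norms cand

-- the final `for nic, ln in zip(nics, cand)` override pass (per element)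
def pvB_apply (nic0 : List (String × String)) (c : Option (PySem.Dict String String)) : List (String × String) :=
  let nic := PySem.Dict.ofList nic0
  match c with
  | none => nic.items
  | some ln =>
    let nic := if nic.getD "product" "" = "" then nic.insert "product" (ln.getD "product" "") else nic
    let nic := if nic.getD "vendor" "" = "" ∨ nic.getD "vendor" "" = "--" then nic.insert "vendor" (ln.getD "vendor" "") else nic
    nic.items

def enrich_nics_from_lshw_alt (nics : List (List (String × String))) (lshw_nics : List (List (String × String))) : List (List (String × String)) :=
  let norms := nics.map (fun nic0 =>
    let nic := PySem.Dict.ofList nic0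
    let m0 := nic.getD "mac" ""                             -- nic.get("mac", "") or ""
    PySem.Str.strip (PySem.Str.lower (if m0 = "" then "" else m0)))
  let cand := lshw_nics.foldl (fun cand ln0 => pvB_stamp ln0 norms cand) (norms.map (fun _ => none))
  List.zipWith pvB_apply nics cand

-- ===== PRECONDITION & SPEC =====
def Spec_enrich_nics_from_lshw (nics : List (List (String × String))) (lshw_nics : List (List (String × String))) (out : List (List (String × String))) : Prop := out = enrich_nics_from_lshw_alt nics lshw_nics
instance (nics : List (List (String × String))) (lshw_nics : List (List (String × String))) (out : List (List (String × String))) : Decidable (Spec_enrich_nics_from_lshw nics lshw_nics out) := by unfold Spec_enrich_nics_from_lshw; infer_instance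

-- ===== CLAIM (what is proved, stated in full; the proofs are below) =====
def Claim_equal_enrich_nics_from_lshw : Prop := ∀ (nics : List (List (String × String))) (lshw_nics : List (List (String × String))), Dom_enrich_nics_from_lshw nics lshw_nics → Spec_enrich_nics_from_lshw nics lshw_nics (enrich_nics_from_lshw nics lshw_nics)

-- ===== LEMMAS AND PROOFS =====

-- lshw-side normalized mac (proof-only abbreviation)
def pvNorm (d : PySem.Dict String String) : String :=
  PySem.Str.strip (PySem.Str.lower (d.getD "mac" ""))

-- nic-side normalized mac (proof-only abbreviation)
def pvNrm (nic0 : List (String × String)) : String :=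
  let m0 := (PySem.Dict.ofList nic0).getD "mac" ""
  PySem.Str.strip (PySem.Str.lower (if m0 = "" then "" else m0))

-- step of A's build loop
def pvStepA (acc : PySem.Dict String (PySem.Dict String String)) (ln0 : List (String × String)) : PySem.Dict String (PySem.Dict String String) :=
  if pvNorm (PySem.Dict.ofList ln0) ≠ "" then acc.insert (pvNorm (PySem.Dict.ofList ln0)) (PySem.Dict.ofList ln0) else acc

-- elementwise view of B's candidate array: the guarded last-match fold for one nic
def pvScan (lshw : List (List (String × String))) (nm : String) (init : Option (PySem.Dict String String)) : Option (PySem.Dict String String) :=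
  lshw.foldl (fun acc ln0 =>
    if pvNorm (PySem.Dict.ofList ln0) ≠ "" ∧ pvNorm (PySem.Dict.ofList ln0) = nm then some (PySem.Dict.ofList ln0) else acc) init

-- A's build loop is a left fold over pvStepA
theorem build_eq_foldl (L : List (List (String × String))) (acc : PySem.Dict String (PySem.Dict String String)) :
    pvA_buildByMac acc L = L.foldl pvStepA acc := by
  induction L generalizing acc with
  | nil => rfl
  | cons ln0 L ih =>
    rw [List.foldl_cons, ← ih]
    simp only [pvA_buildByMac, pvStepA, pvNorm]

-- A's dict lookup at "" is never filled
theorem foldA_get_nil (L : List (List (String × String))) (d : PySem.Dict String (PySem.Dict String String)) :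
    (L.foldl pvStepA d).get? "" = d.get? "" := by
  induction L generalizing d with
  | nil => rfl
  | cons ln0 L ih =>
    rw [List.foldl_cons, ih]
    unfold pvStepA
    by_cases h : pvNorm (PySem.Dict.ofList ln0) = ""
    · simp [h]
    · simp only [h, ne_eq, not_false_eq_true, if_true]
      exact PySem.Dict.get?_insert_of_ne _ _ (Ne.symm h)

-- unfolding one step of the guarded scan
theorem pvScan_cons (ln0 : List (String × String)) (L : List (List (String × String))) (nm : String) (init : Option (PySem.Dict String String)) :
    pvScan (ln0 :: L) nm init
      = pvScan L nm (if pvNorm (PySem.Dict.ofList ln0) ≠ "" ∧ pvNorm (PySem.Dict.ofList ln0) = nm then some (PySem.Dict.ofList ln0) else init) := by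
  unfold pvScan
  rw [List.foldl_cons]

-- A's dict lookup at any mac = the guarded last-match scan
theorem foldA_get (mac : String) (L : List (List (String × String)))
    (d : PySem.Dict String (PySem.Dict String String)) :
    (L.foldl pvStepA d).get? mac = pvScan L mac (d.get? mac) := by
  induction L generalizing d with
  | nil => rfl
  | cons ln0 L ih =>
    rw [List.foldl_cons]
    rw [ih]
    rw [pvScan_cons]
    have hstep : (pvStepA d ln0).get? mac
        = if pvNorm (PySem.Dict.ofList ln0) ≠ "" ∧ pvNorm (PySem.Dict.ofList ln0) = mac then some (PySem.Dict.ofList ln0) else d.get? mac := by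
      unfold pvStepA
      by_cases h0 : pvNorm (PySem.Dict.ofList ln0) = ""
      · rw [if_neg (show ¬(pvNorm (PySem.Dict.ofList ln0) ≠ "" ∧ pvNorm (PySem.Dict.ofList ln0) = mac) from fun hc => hc.1 h0)]
        simp [h0]
      · rw [if_pos (show pvNorm (PySem.Dict.ofList ln0) ≠ "" from h0)]
        by_cases h : pvNorm (PySem.Dict.ofList ln0) = mac
        · rw [if_pos ⟨h0, h⟩, h]
          exact PySem.Dict.get?_insert_self _ _ _
        · rw [if_neg (show ¬(pvNorm (PySem.Dict.ofList ln0) ≠ "" ∧ pvNorm (PySem.Dict.ofList ln0) = mac) from fun hc => h hc.2)]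
          exact PySem.Dict.get?_insert_of_ne _ _ (Ne.symm h)
    rw [hstep]

-- the guarded scan only ever returns entries whose normalized mac is nm
theorem pvScan_norm (nm : String) (L : List (List (String × String))) :
    ∀ (acc : Option (PySem.Dict String String)) (ln : PySem.Dict String String),
      (∀ x, acc = some x → pvNorm x = nm) →
      pvScan L nm acc = some ln → pvNorm ln = nm := by
  induction L with
  | nil => intro acc ln hacc h; exact hacc ln h
  | cons ln0 L ih =>
    intro acc ln hacc h
    unfold pvScan at h
    rw [List.foldl_cons] at h
    refine ih _ ln ?_ h
    intro x hx
    by_cases h0 : pvNorm (PySem.Dict.ofList ln0) ≠ "" ∧ pvNorm (PySem.Dict.ofList ln0) = nm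
    · rw [if_pos h0] at hx; cases hx; exact h0.2
    · rw [if_neg h0] at hx; exact hacc x hx

-- the guarded scan at nm = "" stays at its initial value
theorem pvScan_nil (L : List (List (String × String))) (acc : Option (PySem.Dict String String)) :
    pvScan L "" acc = acc := by
  induction L generalizing acc with
  | nil => rfl
  | cons ln0 L ih =>
    unfold pvScan
    rw [List.foldl_cons, if_neg (by rintro ⟨h1, h2⟩; exact h1 h2)]
    exact ih acc

-- an empty dict (Python-falsy) has empty normalized mac
theorem norm_of_items_nil (ln : PySem.Dict String String) (h : ln.items = []) : pvNorm ln = "" := by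
  have he : ln = PySem.Dict.empty := by
    apply PySem.Dict.ext
    simp [h, PySem.Dict.empty]
  subst he
  unfold pvNorm
  rw [PySem.Dict.getD_empty]
  decide

-- zipWith over a list and a map of the same list collapses to a single map
theorem zipWith_map_self {α β γ : Type} (f : α → β → γ) (g : α → β) (l : List α) :
    List.zipWith f l (l.map g) = l.map (fun a => f a (g a)) := by
  induction l with
  | nil => rfl
  | cons a l ih => simp [ih]

-- B's candidate fold, viewed elementwise: folding pvB_stamp over a mapped array
-- maps each nic to its own guarded last-match scan
theorem stamp_fold (nics : List (List (String × String))) (L : List (List (String × String))) :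
    ∀ (g : List (String × String) → Option (PySem.Dict String String)),
    L.foldl (fun cand ln0 => pvB_stamp ln0 (nics.map pvNrm) cand) (nics.map g)
      = nics.map (fun nic0 => pvScan L (pvNrm nic0) (g nic0)) := by
  induction L with
  | nil => intro g; simp [pvScan]
  | cons ln0 L ih =>
    intro g
    rw [List.foldl_cons]
    have hstep : pvB_stamp ln0 (nics.map pvNrm) (nics.map g)
        = nics.map (fun nic0 =>
            if pvNorm (PySem.Dict.ofList ln0) ≠ "" ∧ pvNorm (PySem.Dict.ofList ln0) = pvNrm nic0
            then some (PySem.Dict.ofList ln0) else g nic0) := by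
      unfold pvB_stamp
      by_cases hm : PySem.Str.strip (PySem.Str.lower ((PySem.Dict.ofList ln0).getD "mac" "")) = ""
      · rw [if_pos hm]
        apply List.map_congr_left
        intro nic0 _
        rw [if_neg (by rintro ⟨h1, _⟩; exact h1 (by unfold pvNorm; exact hm))]
      · rw [if_neg hm]
        rw [List.zipWith_map_left, zipWith_map_self]
        apply List.map_congr_left
        intro nic0 _
        by_cases h : pvNrm nic0 = PySem.Str.strip (PySem.Str.lower ((PySem.Dict.ofList ln0).getD "mac" ""))
        · rw [if_pos h, if_pos ⟨fun h0 => hm (by unfold pvNorm at h0; exact h0), by unfold pvNorm; exact h.symm⟩]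
        · rw [if_neg h, if_neg (by rintro ⟨_, h2⟩; unfold pvNorm at h2; exact h h2.symm)]
    rw [hstep, ih]
    apply List.map_congr_left
    intro nic0 _
    rw [pvScan_cons]

-- pointwise core: A's dict-lookup update = B's guarded scan + apply, over plain variables
theorem pv_core (lshw : List (List (String × String))) (nic : PySem.Dict String String) (mac : String) :
    (match (lshw.foldl pvStepA PySem.Dict.empty).get? mac with
     | none => nic.items
     | some lshw_nic =>
       if lshw_nic.items = [] then nic.items
       else
         let nic := if nic.getD "product" "" = "" then nic.insert "product" (lshw_nic.getD "product" "") else nic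
         let nic := if nic.getD "vendor" "" = "" ∨ nic.getD "vendor" "" = "--" then nic.insert "vendor" (lshw_nic.getD "vendor" "") else nic
         nic.items)
    = (match pvScan lshw mac none with
       | none => nic.items
       | some ln =>
         let nic := if nic.getD "product" "" = "" then nic.insert "product" (ln.getD "product" "") else nic
         let nic := if nic.getD "vendor" "" = "" ∨ nic.getD "vendor" "" = "--" then nic.insert "vendor" (ln.getD "vendor" "") else nic
         nic.items) := by
  by_cases hm : mac = ""
  · subst hm
    rw [foldA_get_nil, PySem.Dict.get?_empty, pvScan_nil]
  · rw [foldA_get mac, PySem.Dict.get?_empty]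
    cases hfold : pvScan lshw mac none with
    | none => rfl
    | some ln =>
      have hn : pvNorm ln = mac := pvScan_norm mac lshw none ln (by intro x hx; cases hx) hfold
      have hne : ln.items ≠ [] := fun h => hm (hn ▸ norm_of_items_nil ln h)
      dsimp only
      rw [if_neg hne]

-- per-element form: A's update of one nic = B's apply of that nic's candidate
theorem pv_elem (lshw : List (List (String × String))) (nic0 : List (String × String)) :
    pvA_update (pvA_buildByMac PySem.Dict.empty lshw) nic0
      = pvB_apply nic0 (pvScan lshw (pvNrm nic0) none) := by
  unfold pvA_update pvB_apply
  rw [build_eq_foldl]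
  exact pv_core lshw (PySem.Dict.ofList nic0) _

-- ===== VERDICT (by name: the statement is the Claim_ definition above) =====
theorem enrich_nics_from_lshw_spec : Claim_equal_enrich_nics_from_lshw := by
  intro nics lshw _
  unfold Spec_enrich_nics_from_lshw enrich_nics_from_lshw enrich_nics_from_lshw_alt
  have hB : (fun nic0 =>
      let nic := PySem.Dict.ofList nic0
      let m0 := nic.getD "mac" ""
      PySem.Str.strip (PySem.Str.lower (if m0 = "" then "" else m0))) = pvNrm := by
    funext nic0; rfl
  rw [hB]
  show _ = List.zipWith pvB_apply nics
      (List.foldl (fun cand ln0 => pvB_stamp ln0 (List.map pvNrm nics) cand)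
        (List.map (fun _ => (none : Option (PySem.Dict String String))) (List.map pvNrm nics)) lshw)
  rw [List.map_map, stamp_fold nics lshw ((fun _ => (none : Option (PySem.Dict String String))) ∘ pvNrm), zipWith_map_self]
  by_cases hL : lshw = []
  · subst hL
    rw [if_pos rfl]
    apply List.map_congr_left
    intro nic0 _
    simp [pvB_apply, pvScan]
  · rw [if_neg hL]
    apply List.map_congr_left
    intro nic0 _
    exact pv_elem lshw nic0
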